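-- pv_equiv track=rewrite | github.com/zju-xuyc/LEAP_v1 | tools/analyse_utils.py | LRE_2_algorithm
-- ===== SOURCE A (Python) =====
-- def LRE_2_algorithm(result_tuple):
--     # 理论上对每辆车辆看到两次需要采样多少帧
--     """
--     hint: 我们可以把这个问题看作是一个dominant的问题，每一帧采样帧可以覆盖k辆车辆，我们可以把这帧覆盖的
--     车辆当成一个已经解决的集合，这样采样新的一帧的时候，我们就可以当作一个全新的集合迭代式地解决最优采样
--     的问题。这样针对每辆车至少采样两帧的情况就可以在采样一帧的基础上进行解决，转化成在已经采样一帧的图像上进行计算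
--     而且采样问题存在着很严重的木桶效应，即短时间出现的车辆限制了采样效率，因为需要保证这些车辆能够至少被看到k次，
--     变相相当于限制了采样的范围(采样的范围由行驶时长最小的车辆决定)
--
--     更一般的，我们可以在认为实际上的采样是在两个interval的最小交集的基础上不断的更新采样，同时区间最大的帧会在保证
--     的采样基础上，获得更多的observation
--     """
--
--     vehicle_range = []
--     sampled_frames = []
--     dominate_group = {}
--     covered_interval_id = []
--
--     for key, value in result_tuple.items():
--         vehicle_range.append([result_tuple[key][0],result_tuple[key][1]])
--     vehicle_range = sorted(vehicle_range, key=lambda x:x[1])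
--     sampled_frames.append(vehicle_range[0][1])
--     current_select = vehicle_range[0][1]
--
--     for index, interval in enumerate(vehicle_range):
--         if current_select < interval[0]:
--             current_select = interval[1]
--             sampled_frames.append(interval[1])
--     for sampled_frame in sampled_frames:
--         for index, interval in enumerate(vehicle_range):
--             if index in covered_interval_id:
--                 continue
--             else:
--                 # 枚举所有的区间
--                 if interval[0] <= sampled_frame and interval[1] >= sampled_frame:
--                     if sampled_frame not in dominate_group.keys():
--                         dominate_group[sampled_frame] = [index]
--                     else:
--                         dominate_group[sampled_frame].append(index)
--                     covered_interval_id.append(index)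
--
--     for key in dominate_group.keys():
--         contain_flag = True # 新的采样帧能够覆盖所有帧
--         intervals = [vehicle_range[i] for i in dominate_group[key]]
--         intervals = sorted(intervals, key=lambda x:x[0])
--         sampled_frame = intervals[-1][0]
--         for interval in intervals:
--             if interval[0] > sampled_frame or interval[1] < sampled_frame:
--                 contain_flag = False
--                 break
--         if contain_flag:
--             sampled_frames.append(sampled_frame)
--
--     return sampled_frames
-- ===== SOURCE B (Python) =====
-- from bisect import bisect_left
--
-- def LRE_2_algorithm(result_tuple):
--     ivals = sorted(([v[0], v[1]] for v in result_tuple.values()), key=lambda x: x[1])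
--     frames = [ivals[0][1]]
--     for s, e in ivals:
--         if frames[-1] < s:
--             frames.append(e)
--     # frames is non-decreasing: assign each interval to its first covering
--     # frame by binary search, keeping only a running (max start, min end)
--     # per frame slot
--     k = len(frames)
--     agg = [None] * k
--     for s, e in ivals:
--         j = bisect_left(frames, s)
--         if j < k and frames[j] <= e:
--             if agg[j] is None:
--                 agg[j] = (s, e)
--             else:
--                 agg[j] = (max(agg[j][0], s), min(agg[j][1], e))
--     out = list(frames)
--     for a in agg:
--         if a is not None and a[0] <= a[1]:
--             out.append(a[0])
--     return out
-- ===== Notes on version B (the rewrite author's own statement) =====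
-- stated objective: faster
-- what changed: B replaces A's per-frame rescans of all intervals against a growing covered-id list and its per-group sort (building a dict of index groups) by one binary-search assignment of each interval to its first covering frame, keeping only a running max-start/min-end per frame.
import Mathlib
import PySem

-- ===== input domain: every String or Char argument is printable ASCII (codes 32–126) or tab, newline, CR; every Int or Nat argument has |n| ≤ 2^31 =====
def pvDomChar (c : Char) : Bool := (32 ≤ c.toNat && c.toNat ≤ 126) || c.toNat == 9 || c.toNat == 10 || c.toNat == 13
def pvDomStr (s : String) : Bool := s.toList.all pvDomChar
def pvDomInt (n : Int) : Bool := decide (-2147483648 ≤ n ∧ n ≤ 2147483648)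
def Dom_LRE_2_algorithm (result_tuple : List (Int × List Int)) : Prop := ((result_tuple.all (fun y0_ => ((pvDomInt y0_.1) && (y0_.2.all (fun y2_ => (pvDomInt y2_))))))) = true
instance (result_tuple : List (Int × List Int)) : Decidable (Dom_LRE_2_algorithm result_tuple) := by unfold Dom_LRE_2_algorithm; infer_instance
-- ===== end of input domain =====

-- B assigns each interval to its first covering frame by binary search with a running
-- max-start/min-end per frame, replacing A's repeated scans over a covered-id list,
-- its dict of index groups and its per-group sort (objective: faster).


-- ===== PORT A =====
def LRE_2_algorithm (result_tuple : List (Int × List Int)) : List Int :=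
  -- result_tuple is a Python dict: the association list is its items in insertion order
  let d := PySem.Dict.mk result_tuple
  let vehicle_range : List (List Int) :=
    result_tuple.foldl (fun acc kv =>
      acc ++ [[PySem.List.pyGetD ((d.get? kv.1).getD []) 0 0,
               PySem.List.pyGetD ((d.get? kv.1).getD []) 1 0]]) []
  let vehicle_range := PySem.List.sorted vehicle_range (fun x => PySem.List.pyGetD x 1 0)
  let first_end := PySem.List.pyGetD (PySem.List.pyGetD vehicle_range 0 []) 1 0
  let st1 := (PySem.List.enumerate vehicle_range).foldl
    (fun (st : List Int × Int) p =>
      if st.2 < PySem.List.pyGetD p.2 0 0 then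
        (st.1 ++ [PySem.List.pyGetD p.2 1 0], PySem.List.pyGetD p.2 1 0)
      else st) ([first_end], first_end)
  let sampled_frames := st1.1
  let st2 := sampled_frames.foldl
    (fun (st : PySem.Dict Int (List Int) × List Int) sampled_frame =>
      (PySem.List.enumerate vehicle_range).foldl
        (fun (st : PySem.Dict Int (List Int) × List Int) p =>
          if p.1 ∈ st.2 then st
          else if PySem.List.pyGetD p.2 0 0 ≤ sampled_frame ∧ sampled_frame ≤ PySem.List.pyGetD p.2 1 0 then
            (if st.1.contains sampled_frame then st.1.modify sampled_frame [] (· ++ [p.1])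
             else st.1.insert sampled_frame [p.1],
             st.2 ++ [p.1])
          else st) st)
      (PySem.Dict.empty, ([] : List Int))
  let dominate_group := st2.1
  dominate_group.keys.foldl
    (fun sampled_frames key =>
      let intervals := (dominate_group.getD key []).map (fun i => PySem.List.pyGetD vehicle_range i [])
      let intervals := PySem.List.sorted intervals (fun x => PySem.List.pyGetD x 0 0)
      let sampled_frame := PySem.List.pyGetD (PySem.List.pyGetD intervals (-1) []) 0 0
      let contain_flag := intervals.all (fun interval =>
        !(decide (sampled_frame < PySem.List.pyGetD interval 0 0) ||
          decide (PySem.List.pyGetD interval 1 0 < sampled_frame)))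
      if contain_flag then sampled_frames ++ [sampled_frame] else sampled_frames)
    sampled_frames

-- ===== PORT B =====
def LRE_2_algorithm_alt (result_tuple : List (Int × List Int)) : List Int :=
  let ivals := PySem.List.sorted
    (result_tuple.map (fun kv => [PySem.List.pyGetD kv.2 0 0, PySem.List.pyGetD kv.2 1 0]))
    (fun x => PySem.List.pyGetD x 1 0)
  let frames := ivals.foldl
    (fun fr iv =>
      if PySem.List.pyGetD fr (-1) 0 < PySem.List.pyGetD iv 0 0 then
        fr ++ [PySem.List.pyGetD iv 1 0]
      else fr)
    [PySem.List.pyGetD (PySem.List.pyGetD ivals 0 []) 1 0]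
  let k := frames.length
  let agg := ivals.foldl
    (fun (agg : List (Option (Int × Int))) iv =>
      let s := PySem.List.pyGetD iv 0 0
      let e := PySem.List.pyGetD iv 1 0
      let j := PySem.List.bisectLeft frames s
      if j < k ∧ frames.getD j 0 ≤ e then
        match agg.getD j none with
        | none => agg.set j (some (s, e))
        | some a => agg.set j (some (max a.1 s, min a.2 e))
      else agg)
    (List.replicate k none)
  agg.foldl
    (fun out a =>
      match a with
      | some p => if p.1 ≤ p.2 then out ++ [p.1] else out
      | none => out)
    frames

-- ===== PRECONDITION & SPEC =====
-- Pre_ excludes exactly the inputs on which the Python A raises: an empty dict or a value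
-- list shorter than 2 (IndexError); Nodup keys states the dict shape (a Python dict cannot
-- carry duplicate keys, so this excludes no dict input).
def Pre_LRE_2_algorithm (result_tuple : List (Int × List Int)) : Prop :=
  result_tuple ≠ [] ∧ (result_tuple.map Prod.fst).Nodup ∧ ∀ p ∈ result_tuple, 2 ≤ p.2.length
instance (result_tuple : List (Int × List Int)) : Decidable (Pre_LRE_2_algorithm result_tuple) := by
  unfold Pre_LRE_2_algorithm; infer_instance
def pvWitness_LRE_2_algorithm : (List (Int × List Int)) := [(0, [1, 3]), (1, [2, 5])]
def Spec_LRE_2_algorithm (result_tuple : List (Int × List Int)) (out : List Int) : Prop := out = LRE_2_algorithm_alt result_tuple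
instance (result_tuple : List (Int × List Int)) (out : List Int) : Decidable (Spec_LRE_2_algorithm result_tuple out) := by unfold Spec_LRE_2_algorithm; infer_instance

-- ===== CLAIM (what is proved, stated in full; the proofs are below) =====
def Claim_equal_LRE_2_algorithm : Prop := ∀ (result_tuple : List (Int × List Int)), Dom_LRE_2_algorithm result_tuple → Pre_LRE_2_algorithm result_tuple → Spec_LRE_2_algorithm result_tuple (LRE_2_algorithm result_tuple)

-- ===== LEMMAS AND PROOFS =====

def pvS (iv : List Int) : Int := PySem.List.pyGetD iv 0 0
def pvE (iv : List Int) : Int := PySem.List.pyGetD iv 1 0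
def pvCovb (c : Int) (iv : List Int) : Bool := decide (pvS iv ≤ c ∧ c ≤ pvE iv)
def pvFC (f : List Int) (iv : List Int) : Option Int := f.find? (fun c => pvCovb c iv)
def pvAstep1 (st : List Int × Int) (iv : List Int) : List Int × Int :=
  if st.2 < pvS iv then (st.1 ++ [pvE iv], pvE iv) else st
def pvStepB (fr : List Int) (iv : List Int) : List Int :=
  if PySem.List.pyGetD fr (-1) 0 < pvS iv then fr ++ [pvE iv] else fr

theorem pv_build (rt : List (Int × List Int)) (hnd : (rt.map Prod.fst).Nodup) :
    rt.foldl (fun acc kv => acc ++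
      [[PySem.List.pyGetD (((PySem.Dict.mk rt).get? kv.1).getD []) 0 0,
        PySem.List.pyGetD (((PySem.Dict.mk rt).get? kv.1).getD []) 1 0]]) [] =
    rt.map (fun kv => [PySem.List.pyGetD kv.2 0 0, PySem.List.pyGetD kv.2 1 0]) := by
  have key : ∀ (F : (Int × List Int) → List Int),
      rt.foldl (fun acc kv => acc ++ [F kv]) [] = rt.map F := by
    intro F
    have := PySem.List.foldl_append_singleton_eq_map F rt []
    simpa using this
  rw [key]
  apply List.map_congr_left
  intro kv hkv
  have h1 : (PySem.Dict.mk rt).get? kv.1 = some kv.2 := by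
    apply PySem.Dict.get?_of_mem_items
    · exact hkv
    · simpa [PySem.Dict.keys] using hnd
  rw [h1]
  rfl

theorem pv_foldl_enumerate_snd {β : Type} (g : β → List Int → β) (l : List (List Int)) :
    ∀ (s : Int) (st : β),
      (PySem.List.enumerate l s).foldl (fun st p => g st p.2) st = l.foldl g st := by
  induction l with
  | nil => intro s st; simp [PySem.List.enumerate_nil]
  | cons x xs ih =>
    intro s st
    rw [PySem.List.enumerate_cons]
    simp only [List.foldl_cons]
    exact ih (s + 1) (g st x)

theorem pv_getLastD_pyGetD (fr : List Int) (h : fr ≠ []) :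
    PySem.List.pyGetD fr (-1) 0 = fr.getLastD 0 := by
  rw [PySem.List.pyGetD_neg_one fr 0 h, List.getLastD_eq_getLast?, List.getLast?_eq_some_getLast h]
  rfl

theorem pv_phase1 (l : List (List Int)) :
    ∀ (fr : List Int), fr ≠ [] →
      l.foldl pvAstep1 (fr, fr.getLastD 0) =
        (l.foldl pvStepB fr, (l.foldl pvStepB fr).getLastD 0) ∧ l.foldl pvStepB fr ≠ [] := by
  induction l with
  | nil => intro fr h; exact ⟨rfl, h⟩
  | cons iv l ih =>
    intro fr h
    simp only [List.foldl_cons]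
    have hstep : pvStepB fr iv = if fr.getLastD 0 < pvS iv then fr ++ [pvE iv] else fr := by
      rw [pvStepB, pv_getLastD_pyGetD fr h]
    have hstep1 : pvAstep1 (fr, fr.getLastD 0) iv =
        (pvStepB fr iv, (pvStepB fr iv).getLastD 0) := by
      rw [pvAstep1, hstep]
      by_cases hc : fr.getLastD 0 < pvS iv
      · rw [List.getLastD_eq_getLast?] at hc ⊢
        rw [if_pos hc, if_pos hc]
        simp
      · rw [List.getLastD_eq_getLast?] at hc ⊢
        rw [if_neg hc, if_neg hc]
        rw [← List.getLastD_eq_getLast?]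
    rw [hstep1]
    by_cases hc : fr.getLastD 0 < pvS iv
    · rw [hstep, if_pos hc]
      exact ih (fr ++ [pvE iv]) (by simp)
    · rw [hstep, if_neg hc]
      exact ih fr h

theorem pv_le_getLastD (l : List Int) (hl : l.Pairwise (· ≤ ·)) :
    ∀ x ∈ l, x ≤ l.getLastD 0 := by
  induction l with
  | nil => simp
  | cons a t ih =>
    intro x hx
    rcases List.mem_cons.mp hx with rfl | hx'
    · cases t with
      | nil => simp
      | cons b m =>
        have hbm : x ≤ (b :: m).getLastD 0 := by
          have hmem : (b :: m).getLastD 0 ∈ b :: m := by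
            rw [List.getLastD_eq_getLast?, List.getLast?_eq_getLast (by simp)]
            exact List.getLast_mem _
          exact (List.pairwise_cons.mp hl).1 _ hmem
        simpa using hbm
    · cases t with
      | nil => simp at hx'
      | cons b m =>
        have := ih (List.pairwise_cons.mp hl).2 x hx'
        simpa using this

theorem pv_greedy (l : List (List Int)) :
    ∀ (fr : List Int), fr ≠ [] → fr.Pairwise (· ≤ ·) →
      (∀ iv ∈ l, fr.getLastD 0 ≤ pvE iv) → l.Pairwise (fun a b => pvE a ≤ pvE b) →
      (l.foldl pvStepB fr).Pairwise (· ≤ ·) ∧ l.foldl pvStepB fr ≠ [] := by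
  induction l with
  | nil => intro fr h hp _ _; exact ⟨hp, h⟩
  | cons iv l ih =>
    intro fr h hp hle hpl
    simp only [List.foldl_cons]
    have hstep : pvStepB fr iv = if fr.getLastD 0 < pvS iv then fr ++ [pvE iv] else fr := by
      rw [pvStepB, pv_getLastD_pyGetD fr h]
    by_cases hc : fr.getLastD 0 < pvS iv
    · rw [hstep, if_pos hc]
      apply ih (fr ++ [pvE iv]) (by simp)
      · rw [List.pairwise_append]
        refine ⟨hp, by simp, ?_⟩
        intro a ha b hb
        simp only [List.mem_singleton] at hb
        subst hb
        exact le_trans (pv_le_getLastD fr hp a ha) (hle iv (by simp))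
      · intro iv' hiv'
        rw [List.getLastD_concat]
        exact (List.pairwise_cons.mp hpl).1 iv' hiv'
      · exact (List.pairwise_cons.mp hpl).2
    · rw [hstep, if_neg hc]
      apply ih fr h hp
      · intro iv' hiv'
        exact hle iv' (by simp [hiv'])
      · exact (List.pairwise_cons.mp hpl).2

theorem pv_FC_append (pre : List Int) (c : Int) (iv : List Int) :
    pvFC (pre ++ [c]) iv = (pvFC pre iv).or (if pvCovb c iv then some c else none) := by
  rw [pvFC, pvFC, List.find?_append]
  congr 1
  rw [List.find?_cons]
  cases pvCovb c iv <;> rfl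

def pvInStep (c : Int) (st : PySem.Dict Int (List Int) × List Int) (p : Int × List Int) :
    PySem.Dict Int (List Int) × List Int :=
  if p.1 ∈ st.2 then st
  else if pvS p.2 ≤ c ∧ c ≤ pvE p.2 then
    (if st.1.contains c then st.1.modify c [] (· ++ [p.1]) else st.1.insert c [p.1],
     st.2 ++ [p.1])
  else st
def pvEV (vr : List (List Int)) : List (Int × List Int) := PySem.List.enumerate vr
def pvUpdD (c : Int) (dg : PySem.Dict Int (List Int)) (l : List Int) : PySem.Dict Int (List Int) :=
  l.foldl (fun d i => if d.contains c then d.modify c [] (· ++ [i]) else d.insert c [i]) dg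

theorem pv_enum_inj (vr : List (List Int)) {p q : Int × List Int}
    (hp : p ∈ pvEV vr) (hq : q ∈ pvEV vr) (h : p.1 = q.1) : p = q := by
  rw [pvEV, PySem.List.mem_enumerate_iff] at hp hq
  obtain ⟨k, hk, rfl⟩ := hp
  obtain ⟨k', hk', rfl⟩ := hq
  simp only at h
  have : k = k' := by omega
  subst this
  rfl

theorem pv_inner (c : Int) (ps : List (Int × List Int)) :
    ∀ (dg : PySem.Dict Int (List Int)) (cov : List Int), (ps.map (·.1)).Nodup →
      ps.foldl (pvInStep c) (dg, cov) =
        (pvUpdD c dg ((ps.filter (fun p => !decide (p.1 ∈ cov) && pvCovb c p.2)).map (·.1)),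
         cov ++ (ps.filter (fun p => !decide (p.1 ∈ cov) && pvCovb c p.2)).map (·.1)) := by
  induction ps with
  | nil => intro dg cov _; simp [pvUpdD]
  | cons p ps ih =>
    intro dg cov hnd
    simp only [List.map_cons, List.nodup_cons] at hnd
    obtain ⟨hp1, hnd'⟩ := hnd
    simp only [List.foldl_cons, List.filter_cons]
    by_cases hmem : p.1 ∈ cov
    · have hstep : pvInStep c (dg, cov) p = (dg, cov) := by
        rw [pvInStep]; simp only [hmem, if_pos]
      rw [hstep]
      simp only [decide_eq_true_eq, hmem, decide_true, Bool.not_true, Bool.false_and,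
        Bool.false_eq_true, if_false]
      exact ih dg cov hnd'
    · by_cases hcv : pvS p.2 ≤ c ∧ c ≤ pvE p.2
      · have hstep : pvInStep c (dg, cov) p =
            (pvUpdD c dg [p.1], cov ++ [p.1]) := by
          rw [pvInStep]
          simp only [hmem, if_neg, if_pos hcv, pvUpdD, List.foldl_cons, List.foldl_nil]
          simp
        rw [hstep, ih (pvUpdD c dg [p.1]) (cov ++ [p.1]) hnd']
        have hcong : ps.filter (fun q => !decide (q.1 ∈ cov ++ [p.1]) && pvCovb c q.2)
            = ps.filter (fun q => !decide (q.1 ∈ cov) && pvCovb c q.2) := by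
          apply List.filter_congr
          intro q hq
          have hne : q.1 ≠ p.1 := by
            intro he
            exact hp1 (he ▸ List.mem_map.mpr ⟨q, hq, rfl⟩)
          simp [List.mem_append, hne]
        rw [hcong]
        have hcond : (!decide (p.1 ∈ cov) && pvCovb c p.2) = true := by
          simp [hmem, pvCovb, hcv]
        rw [if_pos hcond, List.map_cons]
        have e1 : pvUpdD c (pvUpdD c dg [p.1])
            ((ps.filter (fun q => !decide (q.1 ∈ cov) && pvCovb c q.2)).map (·.1))
            = pvUpdD c dg (p.1 :: (ps.filter (fun q => !decide (q.1 ∈ cov) && pvCovb c q.2)).map (·.1)) := rfl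
        rw [e1]
        have e2 : cov ++ [p.1] ++ (ps.filter (fun q => !decide (q.1 ∈ cov) && pvCovb c q.2)).map (·.1)
            = cov ++ p.1 :: (ps.filter (fun q => !decide (q.1 ∈ cov) && pvCovb c q.2)).map (·.1) := by
          simp
        rw [e2]
      · have hstep : pvInStep c (dg, cov) p = (dg, cov) := by
          rw [pvInStep]
          simp only [hmem, if_neg, if_neg hcv]
          simp
        rw [hstep]
        have hcond : (!decide (p.1 ∈ cov) && pvCovb c p.2) = false := by
          simp [pvCovb, hcv]
        rw [if_neg (by simp [hcond])]
        exact ih dg cov hnd'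

theorem pvUpdD_of_contains (c : Int) (l : List Int) :
    ∀ (dg : PySem.Dict Int (List Int)), dg.contains c = true →
      (pvUpdD c dg l).getD c [] = dg.getD c [] ++ l ∧
      (∀ c', c' ≠ c → (pvUpdD c dg l).getD c' [] = dg.getD c' []) ∧
      (∀ c', (pvUpdD c dg l).contains c' = dg.contains c') ∧
      (pvUpdD c dg l).keys = dg.keys := by
  induction l with
  | nil => intro dg _; exact ⟨by simp [pvUpdD], fun _ _ => rfl, fun _ => rfl, rfl⟩
  | cons i l ih =>
    intro dg h
    have hstep : pvUpdD c dg (i :: l) = pvUpdD c (dg.modify c [] (· ++ [i])) l := by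
      rw [pvUpdD, List.foldl_cons, if_pos h]; rfl
    have hc1 : (dg.modify c [] (· ++ [i])).contains c = true := by
      rw [PySem.Dict.contains_modify]; simp
    obtain ⟨h1, h2, h3, h4⟩ := ih (dg.modify c [] (· ++ [i])) hc1
    rw [hstep]
    refine ⟨?_, ?_, ?_, ?_⟩
    · rw [h1, PySem.Dict.getD_modify_self]; simp
    · intro c' hne
      rw [h2 c' hne, PySem.Dict.getD_modify_of_ne _ _ _ hne]
    · intro c'
      rw [h3 c', PySem.Dict.contains_modify]
      by_cases he : c' = c
      · subst he; simp [h]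
      · simp [he]
    · rw [h4, PySem.Dict.keys_modify, PySem.Dict.keys_insert_of_contains _ _ h]

theorem pvUpdD_of_not_contains (c : Int) (l : List Int) (hl : l ≠ [])
    (dg : PySem.Dict Int (List Int)) (h : dg.contains c = false) :
      (pvUpdD c dg l).getD c [] = l ∧
      (∀ c', c' ≠ c → (pvUpdD c dg l).getD c' [] = dg.getD c' []) ∧
      (∀ c', (pvUpdD c dg l).contains c' = ((c' == c) || dg.contains c')) ∧
      (pvUpdD c dg l).keys = dg.keys ++ [c] := by
  cases l with
  | nil => exact absurd rfl hl
  | cons i l =>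
    have hstep : pvUpdD c dg (i :: l) = pvUpdD c (dg.insert c [i]) l := by
      rw [pvUpdD, List.foldl_cons, if_neg (by simp [h])]; rfl
    have hc1 : (dg.insert c [i]).contains c = true := by
      rw [PySem.Dict.contains_insert]; simp
    obtain ⟨h1, h2, h3, h4⟩ := pvUpdD_of_contains c l (dg.insert c [i]) hc1
    rw [hstep]
    refine ⟨?_, ?_, ?_, ?_⟩
    · rw [h1, PySem.Dict.getD_insert_self]; rfl
    · intro c' hne
      rw [h2 c' hne, PySem.Dict.getD_insert_of_ne _ _ _ hne]
    · intro c'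
      rw [h3 c', PySem.Dict.contains_insert]
    · rw [h4, PySem.Dict.keys_insert_of_not_contains _ _ h]

def pvGrp (vr : List (List Int)) (f : List Int) (c : Int) : List Int :=
  ((pvEV vr).filter (fun p => pvFC f p.2 == some c)).map (·.1)
def pvKeysSpec (vr : List (List Int)) (f : List Int) : List Int :=
  (PySem.List.dedup f).filter (fun c => !(pvGrp vr f c).isEmpty)
def pvInv (vr : List (List Int)) (pre : List Int)
    (st : PySem.Dict Int (List Int) × List Int) : Prop :=
  (∀ i, i ∈ st.2 ↔ ∃ p ∈ pvEV vr, p.1 = i ∧ (pvFC pre p.2).isSome) ∧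
  st.1.keys = pvKeysSpec vr pre ∧
  (∀ c, st.1.getD c [] = pvGrp vr pre c) ∧
  (∀ c, st.1.contains c = !(pvGrp vr pre c).isEmpty)

theorem pv_dedup_append (pre : List Int) (c : Int) :
    PySem.List.dedup (pre ++ [c]) =
      if c ∈ pre then PySem.List.dedup pre else PySem.List.dedup pre ++ [c] := by
  simp only [PySem.List.dedup_eq_ofList, PySem.Set.ofList_eq_foldl, List.foldl_append,
    List.foldl_cons, List.foldl_nil]
  rw [← PySem.Set.ofList_eq_foldl]
  by_cases h : c ∈ pre
  · rw [if_pos h]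
    simp [PySem.Set.add, PySem.Set.contains, PySem.Set.mem_ofList, h]
  · rw [if_neg h]
    simp [PySem.Set.add, PySem.Set.contains, PySem.Set.mem_ofList, h]

theorem pv_inv_base (vr : List (List Int)) :
    pvInv vr [] (PySem.Dict.empty, ([] : List Int)) := by
  refine ⟨?_, ?_, ?_, ?_⟩
  · intro i
    simp [pvFC]
  · simp [pvKeysSpec, pvGrp, pvFC, PySem.Dict.keys_empty]
  · intro c
    simp [pvGrp, pvFC, PySem.Dict.getD_empty]
  · intro c
    simp [pvGrp, pvFC, PySem.Dict.contains_empty]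

theorem pv_outer_step (vr : List (List Int)) (pre : List Int) (c : Int)
    (st : PySem.Dict Int (List Int) × List Int) (hinv : pvInv vr pre st) :
    pvInv vr (pre ++ [c]) ((pvEV vr).foldl (pvInStep c) st) := by
  obtain ⟨dg, cov⟩ := st
  obtain ⟨hcov, hkeys, hget, hcont⟩ := hinv
  simp only at hcov hkeys hget hcont
  have hndEV : ((pvEV vr).map (·.1)).Nodup := by
    rw [pvEV, PySem.List.map_fst_enumerate]
    exact PySem.List.nodup_pyRange_one _ _
  rw [pv_inner c (pvEV vr) dg cov hndEV]
  have hmemiff : ∀ p ∈ pvEV vr, (p.1 ∈ cov ↔ (pvFC pre p.2).isSome = true) := by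
    intro p hp
    rw [hcov p.1]
    constructor
    · rintro ⟨q, hq, hq1, hq2⟩
      have heq := pv_enum_inj vr hq hp hq1
      rw [← heq]; exact hq2
    · intro h; exact ⟨p, hp, rfl, h⟩
  have hfilt : (pvEV vr).filter (fun p => !decide (p.1 ∈ cov) && pvCovb c p.2)
      = (pvEV vr).filter (fun p => !(pvFC pre p.2).isSome && pvCovb c p.2) := by
    apply List.filter_congr
    intro p hp
    by_cases hm : p.1 ∈ cov
    · have := (hmemiff p hp).mp hm
      simp [hm, this]
    · have h2 : (pvFC pre p.2).isSome = false := by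
        cases hs : (pvFC pre p.2).isSome
        · rfl
        · exact absurd ((hmemiff p hp).mpr hs) hm
      simp [hm, h2]
  rw [hfilt]
  have hFCiff : ∀ iv, (pvFC (pre ++ [c]) iv).isSome = ((pvFC pre iv).isSome || pvCovb c iv) := by
    intro iv
    rw [pv_FC_append]
    cases h1 : pvFC pre iv <;> cases h2 : pvCovb c iv <;> simp [Option.or, h2]
  by_cases hc : c ∈ pre
  · -- duplicate frame value: nothing changes
    have hcovsome : ∀ iv, pvCovb c iv = true → (pvFC pre iv).isSome = true := by
      intro iv h
      rw [pvFC, List.find?_isSome]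
      exact ⟨c, hc, h⟩
    have hfnil : (pvEV vr).filter (fun p => !(pvFC pre p.2).isSome && pvCovb c p.2) = [] := by
      rw [List.filter_eq_nil_iff]
      intro p _
      cases hcb : pvCovb c p.2
      · simp [hcb]
      · simp [hcb, hcovsome p.2 hcb]
    have hFCeq : ∀ iv, pvFC (pre ++ [c]) iv = pvFC pre iv := by
      intro iv
      rw [pv_FC_append]
      cases h1 : pvFC pre iv
      · have : pvCovb c iv = false := by
          cases hcb : pvCovb c iv
          · rfl
          · have := hcovsome iv hcb
            rw [h1] at this
            simp at this
        simp [this, Option.or]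
      · simp [Option.or]
    have hGrpEq : ∀ c', pvGrp vr (pre ++ [c]) c' = pvGrp vr pre c' := by
      intro c'
      rw [pvGrp, pvGrp]
      congr 1
      apply List.filter_congr
      intro p _
      rw [hFCeq]
    have hKeysEq : pvKeysSpec vr (pre ++ [c]) = pvKeysSpec vr pre := by
      rw [pvKeysSpec, pvKeysSpec, pv_dedup_append, if_pos hc]
      apply List.filter_congr
      intro c' _
      rw [hGrpEq]
    rw [hfnil]
    simp only [List.map_nil, List.append_nil]
    refine ⟨?_, ?_, ?_, ?_⟩
    · intro i
      rw [hcov i]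
      constructor
      · rintro ⟨p, hp, h1, h2⟩
        exact ⟨p, hp, h1, by rw [hFCeq]; exact h2⟩
      · rintro ⟨p, hp, h1, h2⟩
        exact ⟨p, hp, h1, by rw [← hFCeq]; exact h2⟩
    · show (pvUpdD c dg []).keys = _
      rw [hKeysEq]; exact hkeys
    · intro c'
      show (pvUpdD c dg []).getD c' [] = _
      rw [hGrpEq]; exact hget c'
    · intro c'
      show (pvUpdD c dg []).contains c' = _
      rw [hGrpEq]; exact hcont c'
  · -- fresh frame value
    have hGrpPreC : pvGrp vr pre c = [] := by
      rw [pvGrp]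
      have : (pvEV vr).filter (fun p => pvFC pre p.2 == some c) = [] := by
        rw [List.filter_eq_nil_iff]
        intro p _
        cases hfc : pvFC pre p.2 == some c
        · simp
        · have : pvFC pre p.2 = some c := by
            cases hx : pvFC pre p.2
            · rw [hx] at hfc; simp at hfc
            · rw [hx] at hfc; simp at hfc; rw [hfc]
          exact absurd (List.mem_of_find?_eq_some this) hc
      rw [this]; rfl
    have hGrpNe : ∀ c', c' ≠ c → pvGrp vr (pre ++ [c]) c' = pvGrp vr pre c' := by
      intro c' hne
      rw [pvGrp, pvGrp]
      congr 1
      apply List.filter_congr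
      intro p _
      rw [pv_FC_append]
      cases h1 : pvFC pre p.2 with
      | none =>
        cases hcb : pvCovb c p.2
        · simp [Option.or]
        · simp [Option.or, Ne.symm hne]
      | some d => simp [Option.or]
    have hGrpC : pvGrp vr (pre ++ [c]) c =
        ((pvEV vr).filter (fun p => !(pvFC pre p.2).isSome && pvCovb c p.2)).map (·.1) := by
      rw [pvGrp]
      congr 1
      apply List.filter_congr
      intro p _
      rw [pv_FC_append]
      cases h1 : pvFC pre p.2 with
      | none => cases hcb : pvCovb c p.2 <;> simp [Option.or, hcb]
      | some d =>
        have hdmem := List.mem_of_find?_eq_some h1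
        have hdc : d ≠ c := fun h => hc (h ▸ hdmem)
        simp [Option.or, hdc]
    set N := (pvEV vr).filter (fun p => !(pvFC pre p.2).isSome && pvCovb c p.2) with hN
    have hmemN : ∀ i, (i ∈ N.map (·.1)) ↔
        ∃ p ∈ pvEV vr, p.1 = i ∧ ((pvFC pre p.2).isSome = false ∧ pvCovb c p.2 = true) := by
      intro i
      constructor
      · intro hmem
        obtain ⟨p, hpN, hpi⟩ := List.mem_map.mp hmem
        obtain ⟨hpEV, hcondp⟩ := List.mem_filter.mp hpN
        simp only [Bool.and_eq_true, Bool.not_eq_true'] at hcondp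
        exact ⟨p, hpEV, hpi, hcondp.1, hcondp.2⟩
      · rintro ⟨p, hpEV, hpi, h1, h2⟩
        exact List.mem_map.mpr ⟨p, List.mem_filter.mpr ⟨hpEV, by simp [h1, h2]⟩, hpi⟩
    have comp1 : ∀ i, i ∈ cov ++ N.map (·.1) ↔
        ∃ p ∈ pvEV vr, p.1 = i ∧ (pvFC (pre ++ [c]) p.2).isSome := by
      intro i
      rw [List.mem_append, hcov i]
      constructor
      · rintro (⟨p, hp, h1, h2⟩ | hmem)
        · exact ⟨p, hp, h1, by rw [hFCiff]; simp [h2]⟩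
        · obtain ⟨p, hp, h1, _, h3⟩ := (hmemN i).mp hmem
          exact ⟨p, hp, h1, by rw [hFCiff]; simp [h3]⟩
      · rintro ⟨p, hp, h1, h2⟩
        rw [hFCiff] at h2
        cases hs : (pvFC pre p.2).isSome
        · right
          rw [hs] at h2
          simp only [Bool.false_or] at h2
          exact (hmemN i).mpr ⟨p, hp, h1, hs, h2⟩
        · left; exact ⟨p, hp, h1, hs⟩
    by_cases hne2 : N = []
    · rw [hne2]
      simp only [List.map_nil, List.append_nil]
      have hGrpC' : pvGrp vr (pre ++ [c]) c = [] := by rw [hGrpC, hne2]; rfl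
      refine ⟨?_, ?_, ?_, ?_⟩
      · intro i
        have := comp1 i
        rw [hne2] at this
        simpa using this
      · show (pvUpdD c dg []).keys = _
        show dg.keys = _
        rw [hkeys, pvKeysSpec, pvKeysSpec, pv_dedup_append, if_neg hc, List.filter_append]
        have hcfalse : (!(pvGrp vr (pre ++ [c]) c).isEmpty) = false := by
          rw [hGrpC']; rfl
        rw [show List.filter (fun c' => !(pvGrp vr (pre ++ [c]) c').isEmpty) [c] = []
          from by simp [hcfalse], List.append_nil]
        symm
        apply List.filter_congr
        intro c' hc'
        rw [hGrpNe c' (fun h => hc (h ▸ (PySem.List.mem_dedup pre c').mp hc'))]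
      · intro c'
        show (pvUpdD c dg []).getD c' [] = _
        show dg.getD c' [] = _
        by_cases he : c' = c
        · subst he
          rw [hget c', hGrpPreC, hGrpC']
        · rw [hget c', hGrpNe c' he]
      · intro c'
        show (pvUpdD c dg []).contains c' = _
        show dg.contains c' = _
        by_cases he : c' = c
        · subst he
          rw [hcont c', hGrpPreC, hGrpC']
        · rw [hcont c', hGrpNe c' he]
    · have hnews_ne : N.map (·.1) ≠ [] := by simpa using hne2
      have hcontc : dg.contains c = false := by rw [hcont c, hGrpPreC]; rfl
      obtain ⟨g1, g2, g3, g4⟩ := pvUpdD_of_not_contains c (N.map (·.1)) hnews_ne dg hcontc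
      have hGrpCne : (pvGrp vr (pre ++ [c]) c).isEmpty = false := by
        rw [hGrpC]
        cases hx : N.map (·.1)
        · exact absurd hx hnews_ne
        · rfl
      refine ⟨comp1, ?_, ?_, ?_⟩
      · show (pvUpdD c dg (N.map (·.1))).keys = _
        rw [g4, hkeys, pvKeysSpec, pvKeysSpec, pv_dedup_append, if_neg hc, List.filter_append]
        congr 1
        · apply List.filter_congr
          intro c' hc'
          rw [hGrpNe c' (fun h => hc (h ▸ (PySem.List.mem_dedup pre c').mp hc'))]
        · simp [hGrpCne]
      · intro c'
        show (pvUpdD c dg (N.map (·.1))).getD c' [] = _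
        by_cases he : c' = c
        · subst he
          rw [g1, hGrpC]
        · rw [g2 c' he, hget c', hGrpNe c' he]
      · intro c'
        show (pvUpdD c dg (N.map (·.1))).contains c' = _
        by_cases he : c' = c
        · subst he
          rw [g3 c', hGrpCne]
          simp
        · rw [g3 c', hcont c', hGrpNe c' he]
          simp [he]

theorem pv_outer (vr : List (List Int)) (rest : List Int) :
    ∀ (pre : List Int) (st : PySem.Dict Int (List Int) × List Int), pvInv vr pre st →
      pvInv vr (pre ++ rest)
        (rest.foldl (fun st sf => (pvEV vr).foldl (pvInStep sf) st) st) := by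
  induction rest with
  | nil => intro pre st h; simpa using h
  | cons sf rest ih =>
    intro pre st h
    simp only [List.foldl_cons]
    have h1 := pv_outer_step vr pre sf st h
    have h2 := ih (pre ++ [sf]) _ h1
    rwa [List.append_cons]

def pvAggStep (o : Option (Int × Int)) (iv : List Int) : Option (Int × Int) :=
  match o with
  | none => some (pvS iv, pvE iv)
  | some a => some (max a.1 (pvS iv), min a.2 (pvE iv))
def pvAggL (l : List (List Int)) : Option (Int × Int) := l.foldl pvAggStep none
def pvH : Option (Int × Int) → List Int
  | some p => if p.1 ≤ p.2 then [p.1] else []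
  | none => []
def pvLA (vr : List (List Int)) (f : List Int) (c : Int) : List (List Int) :=
  vr.filter (fun iv => pvFC f iv == some c)
def pvKeyStep (dg : PySem.Dict Int (List Int)) (vr : List (List Int))
    (sampled_frames : List Int) (key : Int) : List Int :=
  let intervals := (dg.getD key []).map (fun i => PySem.List.pyGetD vr i [])
  let intervals := PySem.List.sorted intervals (fun x => PySem.List.pyGetD x 0 0)
  let sampled_frame := PySem.List.pyGetD (PySem.List.pyGetD intervals (-1) []) 0 0
  let contain_flag := intervals.all (fun interval =>
    !(decide (sampled_frame < PySem.List.pyGetD interval 0 0) ||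
      decide (PySem.List.pyGetD interval 1 0 < sampled_frame)))
  if contain_flag then sampled_frames ++ [sampled_frame] else sampled_frames

theorem pv_aggL_aux (l : List (List Int)) : ∀ (a : Int × Int),
    ∃ ms me, l.foldl pvAggStep (some a) = some (ms, me) ∧
      a.1 ≤ ms ∧ me ≤ a.2 ∧ (∀ iv ∈ l, pvS iv ≤ ms) ∧ (∀ iv ∈ l, me ≤ pvE iv) ∧
      (ms = a.1 ∨ ∃ iv ∈ l, ms = pvS iv) ∧ (me = a.2 ∨ ∃ iv ∈ l, me = pvE iv) := by
  induction l with
  | nil =>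
    intro a
    exact ⟨a.1, a.2, by simp, le_refl _, le_refl _, by simp, by simp, Or.inl rfl, Or.inl rfl⟩
  | cons iv l ih =>
    intro a
    simp only [List.foldl_cons]
    obtain ⟨ms, me, h1, h2, h3, h4, h5, h6, h7⟩ := ih (max a.1 (pvS iv), min a.2 (pvE iv))
    refine ⟨ms, me, h1, le_trans (le_max_left _ _) h2, le_trans h3 (min_le_left _ _), ?_, ?_, ?_, ?_⟩
    · intro iv' hiv'
      rcases List.mem_cons.mp hiv' with rfl | hm
      · exact le_trans (le_max_right _ _) h2
      · exact h4 iv' hm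
    · intro iv' hiv'
      rcases List.mem_cons.mp hiv' with rfl | hm
      · exact le_trans h3 (min_le_right _ _)
      · exact h5 iv' hm
    · rcases h6 with he | ⟨iv', hm, he⟩
      · rcases le_total (pvS iv) a.1 with hle | hle
        · left; rw [he]; simp [max_eq_left hle]
        · right; exact ⟨iv, by simp, by rw [he]; simp [max_eq_right hle]⟩
      · right; exact ⟨iv', by simp [hm], he⟩
    · rcases h7 with he | ⟨iv', hm, he⟩
      · rcases le_total a.2 (pvE iv) with hle | hle
        · left; rw [he]; simp [min_eq_left hle]
        · right; exact ⟨iv, by simp, by rw [he]; simp [min_eq_right hle]⟩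
      · right; exact ⟨iv', by simp [hm], he⟩

theorem pv_aggL_spec (l : List (List Int)) (hl : l ≠ []) :
    ∃ ms me, pvAggL l = some (ms, me) ∧
      (∀ iv ∈ l, pvS iv ≤ ms) ∧ (∀ iv ∈ l, me ≤ pvE iv) ∧
      (∃ iv ∈ l, pvS iv = ms) ∧ (∃ iv ∈ l, me = pvE iv) := by
  cases l with
  | nil => exact absurd rfl hl
  | cons iv t =>
    obtain ⟨ms, me, h1, h2, h3, h4, h5, h6, h7⟩ := pv_aggL_aux t (pvS iv, pvE iv)
    refine ⟨ms, me, ?_, ?_, ?_, ?_, ?_⟩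
    · rw [pvAggL, List.foldl_cons]
      exact h1
    · intro iv' hiv'
      rcases List.mem_cons.mp hiv' with rfl | hm
      · exact h2
      · exact h4 iv' hm
    · intro iv' hiv'
      rcases List.mem_cons.mp hiv' with rfl | hm
      · exact h3
      · exact h5 iv' hm
    · rcases h6 with he | ⟨iv', hm, he⟩
      · exact ⟨iv, by simp, he.symm⟩
      · exact ⟨iv', by simp [hm], he.symm⟩
    · rcases h7 with he | ⟨iv', hm, he⟩
      · exact ⟨iv, by simp, he⟩
      · exact ⟨iv', by simp [hm], he⟩

theorem pv_pairwise_le_getLast (l : List (List Int)) (h : l ≠ [])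
    (hp : l.Pairwise (fun a b => pvS a ≤ pvS b)) :
    ∀ x ∈ l, pvS x ≤ pvS (l.getLast h) := by
  intro x hx
  obtain ⟨i, hi, rfl⟩ := List.mem_iff_getElem.mp hx
  rw [List.getLast_eq_getElem]
  rcases Nat.lt_or_ge i (l.length - 1) with hlt | hge
  · exact List.pairwise_iff_getElem.mp hp i (l.length - 1) hi (by omega) hlt
  · have : i = l.length - 1 := by omega
    subst this
    exact le_refl _

theorem pv_body (l : List (List Int)) (hl : l ≠ []) (out : List Int) :
    (if (PySem.List.sorted l (fun x => PySem.List.pyGetD x 0 0)).all (fun interval =>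
        !(decide (PySem.List.pyGetD (PySem.List.pyGetD (PySem.List.sorted l (fun x => PySem.List.pyGetD x 0 0)) (-1) []) 0 0 < PySem.List.pyGetD interval 0 0) ||
          decide (PySem.List.pyGetD interval 1 0 < PySem.List.pyGetD (PySem.List.pyGetD (PySem.List.sorted l (fun x => PySem.List.pyGetD x 0 0)) (-1) []) 0 0)))
     then out ++ [PySem.List.pyGetD (PySem.List.pyGetD (PySem.List.sorted l (fun x => PySem.List.pyGetD x 0 0)) (-1) []) 0 0]
     else out) = out ++ pvH (pvAggL l) := by
  obtain ⟨ms, me, hagg, hub, hlb, hatt, hatte⟩ := pv_aggL_spec l hl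
  set srt := PySem.List.sorted l (fun x => PySem.List.pyGetD x 0 0) with hsrt
  have hsne : srt ≠ [] := by
    rw [hsrt, Ne, PySem.List.sorted_eq_nil_iff]
    exact hl
  have hpair : srt.Pairwise (fun a b => pvS a ≤ pvS b) := PySem.List.sorted_pairwise l _
  have hlast : PySem.List.pyGetD srt (-1) [] = srt.getLast hsne :=
    PySem.List.pyGetD_neg_one srt [] hsne
  rw [hlast]
  have hmem_last : srt.getLast hsne ∈ l := by
    rw [← PySem.List.mem_sorted l (fun x => PySem.List.pyGetD x 0 0) false]
    exact List.getLast_mem hsne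
  have hms : pvS (srt.getLast hsne) = ms := by
    apply le_antisymm (hub _ hmem_last)
    obtain ⟨iv, hivmem, hiveq⟩ := hatt
    rw [← hiveq]
    exact pv_pairwise_le_getLast srt hsne hpair iv
      ((PySem.List.mem_sorted l _ false iv).mpr hivmem)
  rw [hagg]
  rw [show PySem.List.pyGetD (srt.getLast hsne) 0 0 = pvS (srt.getLast hsne) from rfl]
  by_cases hcmp : ms ≤ me
  · have hflag : srt.all (fun interval =>
        !(decide (pvS (srt.getLast hsne) < PySem.List.pyGetD interval 0 0) ||
          decide (PySem.List.pyGetD interval 1 0 < pvS (srt.getLast hsne)))) = true := by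
      rw [List.all_eq_true]
      intro iv hiv
      have hivl : iv ∈ l := (PySem.List.mem_sorted l _ false iv).mp hiv
      have h1 : ¬ (pvS (srt.getLast hsne) < pvS iv) := by
        rw [hms]
        exact not_lt.mpr (hub iv hivl)
      have h2 : ¬ (pvE iv < pvS (srt.getLast hsne)) := by
        rw [hms]
        exact not_lt.mpr (le_trans hcmp (hlb iv hivl))
      simp [pvS, pvE] at h1 h2 ⊢
      exact ⟨h1, h2⟩
    rw [hflag]
    simp only [if_true]
    rw [pvH, if_pos hcmp]
    rw [hms]
  · have hflag : srt.all (fun interval =>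
        !(decide (pvS (srt.getLast hsne) < PySem.List.pyGetD interval 0 0) ||
          decide (PySem.List.pyGetD interval 1 0 < pvS (srt.getLast hsne)))) = false := by
      obtain ⟨iv, hivmem, hiveq⟩ := hatte
      rw [List.all_eq_false]
      refine ⟨iv, (PySem.List.mem_sorted l _ false iv).mpr hivmem, ?_⟩
      have h2 : pvE iv < pvS (srt.getLast hsne) := by
        rw [hms, ← hiveq]
        omega
      simp [pvS, pvE] at h2 ⊢
      intro _
      exact h2
    rw [hflag]
    simp only [Bool.false_eq_true, if_false]
    rw [pvH, if_neg hcmp, List.append_nil]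

theorem pv_grp_map (vr : List (List Int)) (f : List Int) (c : Int) :
    (pvGrp vr f c).map (fun i => PySem.List.pyGetD vr i []) = pvLA vr f c := by
  rw [pvGrp, pvLA, List.map_map]
  have h1 : ((pvEV vr).filter (fun p => pvFC f p.2 == some c)).map
      ((fun i => PySem.List.pyGetD vr i []) ∘ (·.1))
      = ((pvEV vr).filter (fun p => pvFC f p.2 == some c)).map (·.2) := by
    apply List.map_congr_left
    intro p hp
    have hpEV : p ∈ pvEV vr := (List.mem_filter.mp hp).1
    rw [pvEV, PySem.List.mem_enumerate_iff] at hpEV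
    obtain ⟨k, hk, rfl⟩ := hpEV
    simp only [Function.comp]
    rw [show ((0 : Int) + (k : Int)) = (k : Int) by omega]
    rw [PySem.List.pyGetD_natCast, List.getD_eq_getElem vr [] hk]
  rw [h1]
  rw [show (fun p : Int × List Int => pvFC f p.2 == some c)
      = ((fun iv => pvFC f iv == some c) ∘ (fun p : Int × List Int => p.2)) from rfl]
  rw [← List.filter_map]
  rw [pvEV, PySem.List.map_snd_enumerate]

theorem pv_grp_empty_iff (vr : List (List Int)) (f : List Int) (c : Int) :
    pvGrp vr f c = [] ↔ pvLA vr f c = [] := by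
  constructor
  · intro h
    rw [← pv_grp_map, h]
    rfl
  · intro h
    have h2 := pv_grp_map vr f c
    rw [h] at h2
    exact List.map_eq_nil_iff.mp h2

theorem pv_flatMap_filter {α β : Type} (l : List α) (q : α → Bool) (g : α → List β)
    (h : ∀ x ∈ l, q x = false → g x = []) :
    (l.filter q).flatMap g = l.flatMap g := by
  induction l with
  | nil => rfl
  | cons x t ih =>
    rw [List.filter_cons]
    cases hq : q x
    · simp only [Bool.false_eq_true, if_false, List.flatMap_cons]
      rw [h x (by simp) hq, List.nil_append]
      exact ih (fun y hy => h y (by simp [hy]))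
    · simp only [if_true, List.flatMap_cons]
      rw [ih (fun y hy => h y (by simp [hy]))]

theorem pv_keys_fold (vr : List (List Int)) (f : List Int) (dg : PySem.Dict Int (List Int))
    (hkeys : dg.keys = pvKeysSpec vr f) (hget : ∀ c, dg.getD c [] = pvGrp vr f c)
    (init : List Int) :
    dg.keys.foldl (pvKeyStep dg vr) init =
      init ++ (PySem.List.dedup f).flatMap (fun c => pvH (pvAggL (pvLA vr f c))) := by
  rw [hkeys]
  rw [PySem.List.foldl_congr_mem (pvKeysSpec vr f) (pvKeyStep dg vr)
      (fun out c => out ++ pvH (pvAggL (pvLA vr f c))) init ?_]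
  · rw [PySem.List.foldl_append_eq_flatMap]
    congr 1
    rw [pvKeysSpec]
    apply pv_flatMap_filter
    intro c _ hq
    have hemp : (pvGrp vr f c).isEmpty = true := by
      cases hx : (pvGrp vr f c).isEmpty
      · rw [hx] at hq; simp at hq
      · rfl
    rw [(pv_grp_empty_iff vr f c).mp (List.isEmpty_iff.mp hemp)]
    rfl
  · intro out c hcmem
    have hgrp_ne : (pvGrp vr f c).isEmpty = false := by
      have := (List.mem_filter.mp (by rwa [pvKeysSpec] at hcmem)).2
      cases hx : (pvGrp vr f c).isEmpty
      · rfl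
      · rw [hx] at this; simp at this
    have hLAne : pvLA vr f c ≠ [] := by
      intro h
      rw [(pv_grp_empty_iff vr f c).mpr h] at hgrp_ne
      simp at hgrp_ne
    rw [pvKeyStep]
    rw [hget c, pv_grp_map]
    exact pv_body (pvLA vr f c) hLAne out

def pvAsg (f : List Int) (j : Nat) (iv : List Int) : Bool :=
  (PySem.List.bisectLeft f (pvS iv) == j) && decide (f.getD j 0 ≤ pvE iv)
def pvIsFirst (f : List Int) (j : Nat) : Bool := decide (∀ i, i < j → f.getD i 0 ≠ f.getD j 0)
def pvBAggStep (frames : List Int) (k : Nat) (agg : List (Option (Int × Int)))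
    (iv : List Int) : List (Option (Int × Int)) :=
  let s := pvS iv
  let e := pvE iv
  let j := PySem.List.bisectLeft frames s
  if j < k ∧ frames.getD j 0 ≤ e then
    match agg.getD j none with
    | none => agg.set j (some (s, e))
    | some a => agg.set j (some (max a.1 s, min a.2 e))
  else agg

theorem pv_flatMap_congr_mem {α β : Type} (l : List α) (g g' : α → List β)
    (h : ∀ x ∈ l, g x = g' x) : l.flatMap g = l.flatMap g' := by
  induction l with
  | nil => rfl
  | cons x t ih =>
    simp only [List.flatMap_cons]
    rw [h x (by simp), ih (fun y hy => h y (by simp [hy]))]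

theorem pv_agg_fold (f : List Int) (hpair : f.Pairwise (· ≤ ·)) (l : List (List Int)) :
    l.foldl (pvBAggStep f f.length) (List.replicate f.length none) =
      (List.range f.length).map (fun j => pvAggL (l.filter (pvAsg f j))) := by
  induction l using List.reverseRecOn with
  | nil =>
    apply List.ext_getElem (by simp)
    intro i hi1 hi2
    simp [pvAggL]
  | append_singleton l iv ih =>
    rw [List.foldl_append, List.foldl_cons, List.foldl_nil, ih]
    rw [pvBAggStep]
    set b := PySem.List.bisectLeft f (pvS iv) with hb
    have hfilt_ne : ∀ j, j < f.length → pvAsg f j iv = false →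
        (l ++ [iv]).filter (pvAsg f j) = l.filter (pvAsg f j) := by
      intro j _ hasg
      rw [List.filter_append]
      simp [hasg]
    by_cases hcond : b < f.length ∧ f.getD b 0 ≤ pvE iv
    · rw [if_pos hcond]
      have hgetD : ((List.range f.length).map (fun j => pvAggL (l.filter (pvAsg f j)))).getD b none
          = pvAggL (l.filter (pvAsg f b)) := by
        rw [List.getD_eq_getElem _ _ (by simpa using hcond.1)]
        simp
      have hasg : pvAsg f b iv = true := by
        rw [pvAsg, ← hb]
        have h2 : decide (f.getD b 0 ≤ pvE iv) = true := by simpa using hcond.2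
        rw [h2]
        simp
      have key : ∀ (v : Option (Int × Int)), v = pvAggStep (pvAggL (l.filter (pvAsg f b))) iv →
          ((List.range f.length).map (fun j => pvAggL (l.filter (pvAsg f j)))).set b v =
          (List.range f.length).map (fun j => pvAggL ((l ++ [iv]).filter (pvAsg f j))) := by
        intro v hv
        apply List.ext_getElem (by simp)
        intro i hi1 hi2
        rw [List.getElem_set]
        simp only [List.getElem_map, List.getElem_range]
        have hilen : i < f.length := by simpa using hi2
        by_cases hib : b = i
        · subst hib
          rw [if_pos rfl, hv]
          rw [List.filter_append]
          simp only [List.filter_cons, hasg, if_pos, List.filter_nil]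
          rw [pvAggL, pvAggL, List.foldl_append, List.foldl_cons, List.foldl_nil]
        · rw [if_neg hib]
          have hasg' : pvAsg f i iv = false := by
            rw [pvAsg, ← hb]
            have h2 : (b == i) = false := by simpa using hib
            rw [h2, Bool.false_and]
          rw [hfilt_ne i hilen hasg']
      cases hAgg : pvAggL (l.filter (pvAsg f b)) with
      | none =>
        rw [hgetD, hAgg]
        exact key _ (by rw [hAgg]; rfl)
      | some a =>
        rw [hgetD, hAgg]
        exact key _ (by rw [hAgg]; rfl)
    · rw [if_neg hcond]
      apply List.map_congr_left
      intro j hjmem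
      have hjlen : j < f.length := List.mem_range.mp hjmem
      have hasg' : pvAsg f j iv = false := by
        rw [pvAsg, ← hb]
        by_cases hjb : b = j
        · subst hjb
          have h2 : decide (f.getD b 0 ≤ pvE iv) = false := by
            have : ¬ f.getD b 0 ≤ pvE iv := fun h => hcond ⟨hjlen, h⟩
            simpa using this
          rw [h2, Bool.and_false]
        · have h2 : (b == j) = false := by simpa using hjb
          rw [h2, Bool.false_and]
      rw [hfilt_ne j hjlen hasg']

theorem pv_out_fold (agg : List (Option (Int × Int))) :
    ∀ (init : List Int),
      agg.foldl (fun out a => match a with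
        | some p => if p.1 ≤ p.2 then out ++ [p.1] else out
        | none => out) init = init ++ agg.flatMap pvH := by
  induction agg with
  | nil => intro init; simp
  | cons a t ih =>
    intro init
    rw [List.foldl_cons, List.flatMap_cons]
    cases a with
    | none => simpa [pvH] using ih init
    | some p =>
      by_cases hc : p.1 ≤ p.2
      · simpa [pvH, hc, List.append_assoc] using ih (init ++ [p.1])
      · simpa [pvH, hc] using ih init

theorem pv_asg_iff (f : List Int) (hpair : f.Pairwise (· ≤ ·)) (j : Nat) (hj : j < f.length)
    (hfirst : pvIsFirst f j = true) (iv : List Int) :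
    (pvFC f iv == some (f.getD j 0)) = pvAsg f j iv := by
  obtain ⟨hbl, hlt, hge⟩ := PySem.List.bisectLeft_spec f (pvS iv) hpair
  set b := PySem.List.bisectLeft f (pvS iv) with hb
  have hfirst' : ∀ i, i < j → f.getD i 0 ≠ f.getD j 0 := by
    simpa [pvIsFirst] using hfirst
  have main : pvFC f iv = some (f.getD j 0) ↔ pvAsg f j iv = true := by
    constructor
    · intro hFC
      rw [pvFC] at hFC
      obtain ⟨hp, j1, hj1, hj1v, hbefore⟩ := List.find?_eq_some_iff_getElem.mp hFC
      have hpv : pvS iv ≤ f.getD j 0 ∧ f.getD j 0 ≤ pvE iv := by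
        simpa [pvCovb] using hp
      have hble : b ≤ j1 := by
        by_contra hgt
        push_neg at hgt
        have := hlt j1 hj1 hgt
        rw [hj1v] at this
        omega
      have hbj1 : b = j1 := by
        by_contra hne
        have hblt : b < j1 := lt_of_le_of_ne hble hne
        have hbl2 : b < f.length := lt_trans hblt hj1
        have h1 : pvS iv ≤ f[b] := hge b hbl2 (le_refl b)
        have h2 : f[b] ≤ f[j1] := List.pairwise_iff_getElem.mp hpair b j1 hbl2 hj1 hblt
        have hcov : pvCovb f[b] iv = true := by
          rw [hj1v] at h2
          rw [pvCovb, decide_eq_true_eq]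
          exact ⟨h1, le_trans h2 hpv.2⟩
        have := hbefore b hblt
        rw [hcov] at this
        simp at this
      have hj1first : ∀ i, i < j1 → f.getD i 0 ≠ f.getD j1 0 := by
        intro i hij1
        have hilen : i < f.length := lt_trans hij1 hj1
        have h1 : f[i] < pvS iv := hlt i hilen (by omega)
        have h2 : pvS iv ≤ f[j1] := by
          rw [hj1v]
          exact hpv.1
        rw [List.getD_eq_getElem _ _ hilen, List.getD_eq_getElem _ _ hj1]
        omega
      have hjj1 : j = j1 := by
        by_contra hne
        rcases Nat.lt_or_ge j j1 with h | h
        · exact hj1first j h (by rw [List.getD_eq_getElem _ _ hj1, hj1v])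
        · have hlt2 : j1 < j := lt_of_le_of_ne h (Ne.symm hne)
          exact hfirst' j1 hlt2 (by rw [List.getD_eq_getElem _ _ hj1, hj1v])
      rw [pvAsg, ← hb]
      have h1 : (b == j) = true := by
        rw [beq_iff_eq]
        omega
      have h2 : decide (f.getD j 0 ≤ pvE iv) = true := by simpa using hpv.2
      rw [h1, h2]
      rfl
    · intro hA
      rw [pvAsg, ← hb] at hA
      simp only [Bool.and_eq_true, beq_iff_eq, decide_eq_true_eq] at hA
      obtain ⟨hbj, hle⟩ := hA
      rw [pvFC]
      apply List.find?_eq_some_iff_getElem.mpr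
      have hjv : f.getD j 0 = f[j] := List.getD_eq_getElem _ _ hj
      refine ⟨?_, j, hj, hjv.symm, ?_⟩
      · have h1 : pvS iv ≤ f[j] := hge j hj (le_of_eq hbj)
        rw [pvCovb, decide_eq_true_eq, hjv]
        exact ⟨h1, by rw [← hjv]; exact hle⟩
      · intro i hij
        have hilen : i < f.length := lt_trans hij hj
        have h1 : f[i] < pvS iv := hlt i hilen (by omega)
        rw [Bool.not_eq_eq_eq_not, Bool.not_true, pvCovb, decide_eq_false_iff_not]
        rintro ⟨ha, _⟩
        omega
  cases hx : pvAsg f j iv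
  · cases hy : (pvFC f iv == some (f.getD j 0))
    · rfl
    · exfalso
      have := main.mp (by simpa using hy)
      rw [hx] at this
      simp at this
  · simp [main.mpr hx]

theorem pv_asg_nonfirst (f : List Int) (hpair : f.Pairwise (· ≤ ·)) (j : Nat)
    (hj : j < f.length) (hnf : pvIsFirst f j = false) (iv : List Int) :
    pvAsg f j iv = false := by
  obtain ⟨hbl, hlt, hge⟩ := PySem.List.bisectLeft_spec f (pvS iv) hpair
  cases hx : pvAsg f j iv
  · rfl
  · exfalso
    rw [pvAsg] at hx
    simp only [Bool.and_eq_true, beq_iff_eq, decide_eq_true_eq] at hx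
    obtain ⟨hbj, _⟩ := hx
    obtain ⟨i, hij, hieq⟩ : ∃ i, i < j ∧ f.getD i 0 = f.getD j 0 := by
      have := hnf
      simp only [pvIsFirst, decide_eq_false_iff_not] at this
      push_neg at this
      obtain ⟨i, h1, h2⟩ := this
      exact ⟨i, h1, h2⟩
    have hilen : i < f.length := lt_trans hij hj
    have h1 : f[i] < pvS iv := hlt i hilen (by omega)
    have h2 : pvS iv ≤ f[j] := hge j hj (le_of_eq hbj)
    rw [List.getD_eq_getElem _ _ hilen, List.getD_eq_getElem _ _ hj] at hieq
    omega

theorem pv_dedup_eq (f : List Int) :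
    PySem.List.dedup f =
      ((List.range f.length).filter (pvIsFirst f)).map (fun j => f.getD j 0) := by
  induction f using List.reverseRecOn with
  | nil => rfl
  | append_singleton f x ih =>
    rw [pv_dedup_append, ih]
    have hlen : (f ++ [x]).length = f.length + 1 := by simp
    rw [hlen, List.range_succ, List.filter_append, List.map_append]
    have hgetpre : ∀ j, j < f.length → (f ++ [x]).getD j 0 = f.getD j 0 := fun j hj =>
      List.getD_append f [x] 0 j hj
    have hgetlast : (f ++ [x]).getD f.length 0 = x := by
      rw [List.getD_eq_getElem _ _ (by simp)]
      simp
    have hfiltcong : (List.range f.length).filter (pvIsFirst (f ++ [x]))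
        = (List.range f.length).filter (pvIsFirst f) := by
      apply List.filter_congr
      intro j hj
      have hjlen : j < f.length := List.mem_range.mp hj
      simp only [pvIsFirst, decide_eq_decide]
      constructor
      · intro h i hij
        have := h i hij
        rwa [hgetpre i (lt_trans hij hjlen), hgetpre j hjlen] at this
      · intro h i hij
        rw [hgetpre i (lt_trans hij hjlen), hgetpre j hjlen]
        exact h i hij
    have hmapcong : ((List.range f.length).filter (pvIsFirst f)).map (fun j => (f ++ [x]).getD j 0)
        = ((List.range f.length).filter (pvIsFirst f)).map (fun j => f.getD j 0) := by
      apply List.map_congr_left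
      intro j hjmem
      exact hgetpre j (List.mem_range.mp (List.mem_of_mem_filter hjmem))
    rw [hfiltcong, hmapcong]
    by_cases hx : x ∈ f
    · rw [if_pos hx]
      have hisf : pvIsFirst (f ++ [x]) f.length = false := by
        simp only [pvIsFirst, decide_eq_false_iff_not]
        push_neg
        obtain ⟨i, hi, hieq⟩ := List.mem_iff_getElem.mp hx
        refine ⟨i, hi, ?_⟩
        rw [hgetpre i hi, hgetlast, List.getD_eq_getElem _ _ hi, hieq]
      rw [show List.filter (pvIsFirst (f ++ [x])) [f.length] = [] from by simp [hisf]]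
      rw [List.map_nil, List.append_nil]
    · rw [if_neg hx]
      have hisf : pvIsFirst (f ++ [x]) f.length = true := by
        simp only [pvIsFirst, decide_eq_true_eq]
        intro i hi heq
        apply hx
        rw [hgetpre i hi, hgetlast, List.getD_eq_getElem _ _ hi] at heq
        rw [← heq]
        exact List.getElem_mem hi
      rw [show List.filter (pvIsFirst (f ++ [x])) [f.length] = [f.length] from by simp [hisf]]
      rw [List.map_cons, List.map_nil, hgetlast]

theorem pv_bridge (vr : List (List Int)) (f : List Int) (hpair : f.Pairwise (· ≤ ·)) :
    (PySem.List.dedup f).flatMap (fun c => pvH (pvAggL (pvLA vr f c))) =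
      (List.range f.length).flatMap (fun j => pvH (pvAggL (vr.filter (pvAsg f j)))) := by
  rw [pv_dedup_eq f, List.flatMap_map]
  have hcong : ((List.range f.length).filter (pvIsFirst f)).flatMap
        (fun j => pvH (pvAggL (pvLA vr f (f.getD j 0))))
      = ((List.range f.length).filter (pvIsFirst f)).flatMap
        (fun j => pvH (pvAggL (vr.filter (pvAsg f j)))) := by
    apply pv_flatMap_congr_mem
    intro j hjmem
    have hjlen : j < f.length := List.mem_range.mp (List.mem_of_mem_filter hjmem)
    have hfirst : pvIsFirst f j = true := (List.mem_filter.mp hjmem).2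
    congr 1
    rw [pvLA]
    congr 1
    apply List.filter_congr
    intro iv _
    exact pv_asg_iff f hpair j hjlen hfirst iv
  rw [hcong]
  apply pv_flatMap_filter
  intro j hjmem hq
  have hjlen : j < f.length := List.mem_range.mp hjmem
  rw [List.filter_eq_nil_iff.mpr
    (fun iv _ => by simp [pv_asg_nonfirst f hpair j hjlen hq iv])]
  rfl

def pvFrames (vr : List (List Int)) : List Int :=
  vr.foldl pvStepB [PySem.List.pyGetD (PySem.List.pyGetD vr 0 []) 1 0]
def pvApipe (vr : List (List Int)) : List Int :=
  let first_end := PySem.List.pyGetD (PySem.List.pyGetD vr 0 []) 1 0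
  let st1 := (pvEV vr).foldl (fun (st : List Int × Int) p => pvAstep1 st p.2)
    ([first_end], first_end)
  let st2 := st1.1.foldl (fun st sf => (pvEV vr).foldl (pvInStep sf) st)
    (PySem.Dict.empty, ([] : List Int))
  st2.1.keys.foldl (pvKeyStep st2.1 vr) st1.1
def pvBpipe (vr : List (List Int)) : List Int :=
  let frames := pvFrames vr
  let k := frames.length
  let agg := vr.foldl (pvBAggStep frames k) (List.replicate k none)
  agg.foldl (fun out a => match a with
    | some p => if p.1 ≤ p.2 then out ++ [p.1] else out
    | none => out) frames

theorem pv_frames_facts (vr : List (List Int)) (hne : vr ≠ [])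
    (hpairE : vr.Pairwise (fun a b => pvE a ≤ pvE b)) :
    (pvFrames vr).Pairwise (· ≤ ·) ∧ pvFrames vr ≠ [] := by
  rw [pvFrames]
  apply pv_greedy vr [PySem.List.pyGetD (PySem.List.pyGetD vr 0 []) 1 0] (by simp) (by simp)
  · intro iv hiv
    cases vr with
    | nil => exact absurd rfl hne
    | cons hd tl =>
      have he0 : ([PySem.List.pyGetD (PySem.List.pyGetD (hd :: tl) 0 []) 1 0] : List Int).getLastD 0
          = pvE hd := by
        rw [PySem.List.pyGetD_zero_cons]
        rfl
      rw [he0]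
      rcases List.mem_cons.mp hiv with rfl | hm
      · exact le_refl _
      · exact (List.pairwise_cons.mp hpairE).1 iv hm
  · exact hpairE

theorem pv_Apipe_eq (vr : List (List Int)) (_hne : vr ≠ [])
    (_hpairE : vr.Pairwise (fun a b => pvE a ≤ pvE b)) :
    pvApipe vr = pvFrames vr ++
      (PySem.List.dedup (pvFrames vr)).flatMap
        (fun c => pvH (pvAggL (pvLA vr (pvFrames vr) c))) := by
  have hph1 : (pvEV vr).foldl (fun (st : List Int × Int) p => pvAstep1 st p.2)
      ([PySem.List.pyGetD (PySem.List.pyGetD vr 0 []) 1 0],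
       PySem.List.pyGetD (PySem.List.pyGetD vr 0 []) 1 0)
      = (pvFrames vr, (pvFrames vr).getLastD 0) := by
    have ha : (pvEV vr).foldl (fun (st : List Int × Int) p => pvAstep1 st p.2)
        ([PySem.List.pyGetD (PySem.List.pyGetD vr 0 []) 1 0],
         PySem.List.pyGetD (PySem.List.pyGetD vr 0 []) 1 0)
        = vr.foldl pvAstep1
        ([PySem.List.pyGetD (PySem.List.pyGetD vr 0 []) 1 0],
         PySem.List.pyGetD (PySem.List.pyGetD vr 0 []) 1 0) :=
      pv_foldl_enumerate_snd pvAstep1 vr 0 _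
    rw [ha]
    exact (pv_phase1 vr [PySem.List.pyGetD (PySem.List.pyGetD vr 0 []) 1 0] (by simp)).1
  have hinv := pv_outer vr (pvFrames vr) [] (PySem.Dict.empty, ([] : List Int)) (pv_inv_base vr)
  rw [List.nil_append] at hinv
  obtain ⟨_, hkeys, hget, _⟩ := hinv
  simp only [pvApipe]
  rw [hph1]
  exact pv_keys_fold vr (pvFrames vr) _ hkeys hget (pvFrames vr)

theorem pv_Bpipe_eq (vr : List (List Int)) (hne : vr ≠ [])
    (hpairE : vr.Pairwise (fun a b => pvE a ≤ pvE b)) :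
    pvBpipe vr = pvFrames vr ++
      (List.range (pvFrames vr).length).flatMap
        (fun j => pvH (pvAggL (vr.filter (pvAsg (pvFrames vr) j)))) := by
  have hpairf : (pvFrames vr).Pairwise (· ≤ ·) := (pv_frames_facts vr hne hpairE).1
  simp only [pvBpipe]
  rw [pv_agg_fold (pvFrames vr) hpairf vr, pv_out_fold, List.flatMap_map]


theorem pv_main (rt : List (Int × List Int)) (hpre : Pre_LRE_2_algorithm rt) :
    LRE_2_algorithm rt = LRE_2_algorithm_alt rt := by
  obtain ⟨hne, hnd, _⟩ := hpre
  have hA0 : LRE_2_algorithm rt = pvApipe (PySem.List.sorted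
      (rt.foldl (fun acc kv => acc ++
        [[PySem.List.pyGetD (((PySem.Dict.mk rt).get? kv.1).getD []) 0 0,
          PySem.List.pyGetD (((PySem.Dict.mk rt).get? kv.1).getD []) 1 0]]) [])
      (fun x => PySem.List.pyGetD x 1 0)) := rfl
  have hB0 : LRE_2_algorithm_alt rt = pvBpipe (PySem.List.sorted
      (rt.map (fun kv => [PySem.List.pyGetD kv.2 0 0, PySem.List.pyGetD kv.2 1 0]))
      (fun x => PySem.List.pyGetD x 1 0)) := rfl
  rw [hA0, hB0, pv_build rt hnd]
  set vr := PySem.List.sorted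
    (rt.map (fun kv => [PySem.List.pyGetD kv.2 0 0, PySem.List.pyGetD kv.2 1 0]))
    (fun x => PySem.List.pyGetD x 1 0) with hvr
  have hvne : vr ≠ [] := by
    rw [hvr, Ne, PySem.List.sorted_eq_nil_iff, List.map_eq_nil_iff]
    exact hne
  have hpairE : vr.Pairwise (fun a b => pvE a ≤ pvE b) := PySem.List.sorted_pairwise _ _
  rw [pv_Apipe_eq vr hvne hpairE, pv_Bpipe_eq vr hvne hpairE]
  congr 1
  exact pv_bridge vr (pvFrames vr) (pv_frames_facts vr hvne hpairE).1

-- ===== VERDICT (by name: the statement is the Claim_ definition above) =====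
theorem LRE_2_algorithm_spec : Claim_equal_LRE_2_algorithm := by
  intro rt _ hpre
  exact pv_main rt hpre
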